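-- pv_equiv track=rewrite | github.com/SamueleMastromatteo/personalRepo | temi_esame_svolti/polizia/polizia.py | distanza_polizia
-- ===== SOURCE A (Python) =====
-- def distanza_polizia(testo):
--     righe_nome = set()
--     righe_polizia = set()
--     distanze = set()
--     for i, riga in enumerate(testo):
--         if "bob" in riga or "arctor" in riga:
--             righe_nome.add(i)
--         if "polizia" in riga:
--             righe_polizia.add(i)
--     if len(righe_nome) == 0 or len(righe_polizia) == 0:
--         return None
--     else:
--         for i_nome in righe_nome:
--             for i_polizia in righe_polizia:
--                 distanze.add(abs(i_polizia-i_nome))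
--
--         return min(distanze)
-- ===== SOURCE B (Python) =====
-- def distanza_polizia(testo):
--     best = None
--     last_nome = None
--     last_polizia = None
--     for i, riga in enumerate(testo):
--         nome = "bob" in riga or "arctor" in riga
--         polizia = "polizia" in riga
--         if nome:
--             last_nome = i
--         if polizia:
--             last_polizia = i
--         if nome and last_polizia is not None:
--             d = i - last_polizia
--             best = d if best is None else min(best, d)
--         if polizia and last_nome is not None:
--             d = i - last_nome
--             best = d if best is None else min(best, d)
--     return best
-- ===== Notes on version B (the rewrite author's own statement) =====
-- stated objective: alternative
-- what changed: Replaced A's two index sets plus nested loop over all name/polizia index pairs by a single pass that keeps only the last name index and last polizia index and updates a running minimum distance, which is exact because the nearest opposite line before any line is the last one seen; the pair enumeration disappears (on keyword-free random text both are dominated by the substring scans, so no measured speed-up).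
import Mathlib
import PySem

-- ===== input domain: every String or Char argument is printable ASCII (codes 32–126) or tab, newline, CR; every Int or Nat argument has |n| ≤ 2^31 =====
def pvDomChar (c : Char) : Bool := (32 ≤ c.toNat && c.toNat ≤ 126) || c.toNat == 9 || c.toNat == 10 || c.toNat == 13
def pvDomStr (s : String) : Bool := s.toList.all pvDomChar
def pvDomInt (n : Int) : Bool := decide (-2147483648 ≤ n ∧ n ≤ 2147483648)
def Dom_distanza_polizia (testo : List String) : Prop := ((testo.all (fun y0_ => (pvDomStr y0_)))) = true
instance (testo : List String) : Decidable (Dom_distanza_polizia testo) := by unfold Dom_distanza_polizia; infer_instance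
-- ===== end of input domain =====

-- B replaces A's index sets and nested loop over all name×polizia index pairs by a single
-- pass keeping the last index of each kind and a running minimum (alternative algorithm).

-- ===== PORT A =====
-- '"bob" in riga or "arctor" in riga' and '"polizia" in riga' (the tests both sources share)
def pvNameLine (r : String) : Bool := PySem.Str.isIn "bob" r || PySem.Str.isIn "arctor" r
def pvPolLine (r : String) : Bool := PySem.Str.isIn "polizia" r

def distanza_polizia (testo : List String) : Option Int :=
  let sets : PySem.Set Int × PySem.Set Int :=
    (PySem.List.enumerate testo 0).foldl
      (fun st p =>
        (if pvNameLine p.2 then PySem.Set.add st.1 p.1 else st.1,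
         if pvPolLine p.2 then PySem.Set.add st.2 p.1 else st.2))
      (PySem.Set.empty, PySem.Set.empty)
  if PySem.Set.len sets.1 = 0 ∨ PySem.Set.len sets.2 = 0 then none
  else
    let distanze : PySem.Set Int :=
      sets.1.foldl
        (fun d i_nome => sets.2.foldl (fun d i_pol => PySem.Set.add d |i_pol - i_nome|) d)
        PySem.Set.empty
    PySem.List.min? distanze (fun x => x)

-- ===== PORT B =====
-- 'best = d if best is None else min(best, d)'
def pvSomeMin (best : Option Int) (d : Int) : Option Int :=
  some (match best with | none => d | some b => min b d)

-- 'if <flag> and last_… is not None: best = min-update with i - last_…'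
def pvUpd (best lastO : Option Int) (i : Int) : Option Int :=
  match lastO with | some j => pvSomeMin best (i - j) | none => best

-- one loop step of B (the body of the 'for i, riga in enumerate(testo)' loop)
def pvStep (st : Option Int × Option Int × Option Int) (p : Int × String) :
    Option Int × Option Int × Option Int :=
  let nome := pvNameLine p.2
  let pol := pvPolLine p.2
  let lastN := if nome then some p.1 else st.2.1
  let lastP := if pol then some p.1 else st.2.2
  let best1 := if nome then pvUpd st.1 lastP p.1 else st.1
  let best2 := if pol then pvUpd best1 lastN p.1 else best1
  (best2, lastN, lastP)

def distanza_polizia_alt (testo : List String) : Option Int :=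
  ((PySem.List.enumerate testo 0).foldl pvStep (none, none, none)).1

-- ===== PRECONDITION & SPEC =====
def Spec_distanza_polizia (testo : List String) (out : Option Int) : Prop := out = distanza_polizia_alt testo
instance (testo : List String) (out : Option Int) : Decidable (Spec_distanza_polizia testo out) := by unfold Spec_distanza_polizia; infer_instance

-- ===== CLAIM (what is proved, stated in full; the proofs are below) =====
def Claim_equal_distanza_polizia : Prop := ∀ (testo : List String), Dom_distanza_polizia testo → Spec_distanza_polizia testo (distanza_polizia testo)

-- ===== LEMMAS AND PROOFS =====

-- indices (counting from s) of the name / polizia lines: the common reference of both ports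
def NIdx (testo : List String) (s : Int) : List Int :=
  ((PySem.List.enumerate testo s).filter (fun p => pvNameLine p.2)).map (·.1)
def PIdx (testo : List String) (s : Int) : List Int :=
  ((PySem.List.enumerate testo s).filter (fun p => pvPolLine p.2)).map (·.1)

-- m is THE answer: a realised pair distance and a lower bound on all pair distances
def GoodMin (N P : List Int) (m : Int) : Prop :=
  (∃ n ∈ N, ∃ p ∈ P, m = |p - n|) ∧ (∀ n ∈ N, ∀ p ∈ P, m ≤ |p - n|)

theorem goodmin_unique {N P : List Int} {m m' : Int}
    (h : GoodMin N P m) (h' : GoodMin N P m') : m = m' := by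
  obtain ⟨⟨n, hn, p, hp, hm⟩, hmin⟩ := h
  obtain ⟨⟨n', hn', p', hp', hm'⟩, hmin'⟩ := h'
  have h1 := hmin n' hn' p' hp'
  have h2 := hmin' n hn p hp
  rw [← hm'] at h1
  rw [← hm] at h2
  omega

theorem goodmin_nonneg {N P : List Int} {m : Int} (h : GoodMin N P m) : 0 ≤ m := by
  obtain ⟨⟨n, hn, p, hp, hm⟩, _⟩ := h
  rw [hm]
  exact abs_nonneg _

theorem NIdx_nil (s : Int) : NIdx [] s = [] := rfl
theorem PIdx_nil (s : Int) : PIdx [] s = [] := rfl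

theorem NIdx_cons (x : String) (xs : List String) (s : Int) :
    NIdx (x :: xs) s = (if pvNameLine x then [s] else []) ++ NIdx xs (s + 1) := by
  simp only [NIdx, PySem.List.enumerate_cons, List.filter_cons]
  by_cases h : pvNameLine x <;> simp [h]

theorem PIdx_cons (x : String) (xs : List String) (s : Int) :
    PIdx (x :: xs) s = (if pvPolLine x then [s] else []) ++ PIdx xs (s + 1) := by
  simp only [PIdx, PySem.List.enumerate_cons, List.filter_cons]
  by_cases h : pvPolLine x <;> simp [h]

-- ----- A side -----

theorem setadd_append {s : List Int} {x : Int} (h : x ∉ s) :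
    PySem.Set.add s x = s ++ [x] := by
  simp [PySem.Set.add, PySem.Set.contains, h]

theorem A_fold (testo : List String) (s : Int) (a1 a2 : List Int)
    (h1 : ∀ x ∈ a1, x < s) (h2 : ∀ x ∈ a2, x < s) :
    (PySem.List.enumerate testo s).foldl
      (fun (st : PySem.Set Int × PySem.Set Int) p =>
        (if pvNameLine p.2 then PySem.Set.add st.1 p.1 else st.1,
         if pvPolLine p.2 then PySem.Set.add st.2 p.1 else st.2))
      (a1, a2)
    = (a1 ++ NIdx testo s, a2 ++ PIdx testo s) := by
  induction testo generalizing s a1 a2 with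
  | nil => simp [NIdx_nil, PIdx_nil, PySem.List.enumerate_nil]
  | cons a t ih =>
    rw [PySem.List.enumerate_cons, List.foldl_cons]
    have hadd1 : (if pvNameLine a then PySem.Set.add a1 s else a1)
        = a1 ++ (if pvNameLine a then [s] else []) := by
      split
      · exact setadd_append (fun hm => absurd (h1 s hm) (by omega))
      · simp
    have hadd2 : (if pvPolLine a then PySem.Set.add a2 s else a2)
        = a2 ++ (if pvPolLine a then [s] else []) := by
      split
      · exact setadd_append (fun hm => absurd (h2 s hm) (by omega))
      · simp
    simp only [hadd1, hadd2]
    rw [ih (s + 1) _ _ ?_ ?_, NIdx_cons, PIdx_cons, List.append_assoc, List.append_assoc]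
    · intro x hx
      rcases List.mem_append.1 hx with h | h
      · have := h1 x h; omega
      · split at h <;> simp_all
    · intro x hx
      rcases List.mem_append.1 hx with h | h
      · have := h2 x h; omega
      · split at h <;> simp_all

theorem mem_foldl_add (l : List Int) (d : PySem.Set Int) (f : Int → Int) (x : Int) :
    (x ∈ l.foldl (fun d i => PySem.Set.add d (f i)) d) ↔ x ∈ d ∨ ∃ i ∈ l, x = f i := by
  induction l generalizing d with
  | nil => simp
  | cons a t ih =>
    rw [List.foldl_cons, ih]
    constructor
    · rintro (h | h)
      · rcases (PySem.Set.mem_add _ _ _).1 h with h | h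
        · exact Or.inl h
        · exact Or.inr ⟨a, by simp, h⟩
      · obtain ⟨i, hi, hx⟩ := h; exact Or.inr ⟨i, by simp [hi], hx⟩
    · rintro (h | ⟨i, hi, hx⟩)
      · exact Or.inl ((PySem.Set.mem_add _ _ _).2 (Or.inl h))
      · rcases List.mem_cons.1 hi with h | h
        · exact Or.inl ((PySem.Set.mem_add _ _ _).2 (Or.inr (h ▸ hx)))
        · exact Or.inr ⟨i, h, hx⟩

theorem mem_dist (rn rp : List Int) (d : PySem.Set Int) (x : Int) :
    (x ∈ rn.foldl (fun d i_nome => rp.foldl (fun d i_pol => PySem.Set.add d |i_pol - i_nome|) d) d)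
    ↔ x ∈ d ∨ ∃ n ∈ rn, ∃ p ∈ rp, x = |p - n| := by
  induction rn generalizing d with
  | nil => simp
  | cons a t ih =>
    rw [List.foldl_cons, ih, mem_foldl_add]
    constructor
    · rintro ((h | ⟨p, hp, hx⟩) | ⟨n, hn, p, hp, hx⟩)
      · exact Or.inl h
      · exact Or.inr ⟨a, by simp, p, hp, hx⟩
      · exact Or.inr ⟨n, by simp [hn], p, hp, hx⟩
    · rintro (h | ⟨n, hn, p, hp, hx⟩)
      · exact Or.inl (Or.inl h)
      · rcases List.mem_cons.1 hn with h | h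
        · exact Or.inl (Or.inr ⟨p, hp, h ▸ hx⟩)
        · exact Or.inr ⟨n, h, p, hp, hx⟩

theorem A_char (testo : List String) :
    (NIdx testo 0 = [] ∨ PIdx testo 0 = [] → distanza_polizia testo = none) ∧
    (∀ m, distanza_polizia testo = some m → GoodMin (NIdx testo 0) (PIdx testo 0) m) ∧
    (NIdx testo 0 ≠ [] → PIdx testo 0 ≠ [] → ∃ m, distanza_polizia testo = some m) := by
  have hfold := A_fold testo 0 [] [] (by simp) (by simp)
  unfold distanza_polizia
  simp only [PySem.Set.empty] at hfold ⊢
  rw [hfold]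
  simp only [List.nil_append]
  set N := NIdx testo 0 with hN
  set P := PIdx testo 0 with hP
  by_cases hNe : N = [] <;> by_cases hPe : P = []
  · simp [hNe, hPe, PySem.Set.len]
  · simp [hNe, hPe, PySem.Set.len]
  · simp [hNe, hPe, PySem.Set.len]
  · have hlen : ¬(PySem.Set.len N = 0 ∨ PySem.Set.len P = 0) := by
      simp [PySem.Set.len, List.length_eq_zero_iff, hNe, hPe]
    simp only [hlen, if_false]
    refine ⟨by tauto, ?_, ?_⟩
    · intro m hm
      constructor
      · have hmem := PySem.List.min?_mem hm
        rcases (mem_dist N P [] m).1 hmem with h | h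
        · simp at h
        · exact h
      · intro n hn p hp
        exact PySem.List.min?_isMin hm _ ((mem_dist N P [] _).2 (Or.inr ⟨n, hn, p, hp, rfl⟩))
    · intro _ _
      rcases List.exists_mem_of_ne_nil N hNe with ⟨n, hn⟩
      rcases List.exists_mem_of_ne_nil P hPe with ⟨p, hp⟩
      have hmem : |p - n| ∈ N.foldl (fun d i_nome => P.foldl (fun d i_pol => PySem.Set.add d |i_pol - i_nome|) d) ([] : PySem.Set Int) :=
        (mem_dist N P [] _).2 (Or.inr ⟨n, hn, p, hp, rfl⟩)
      have hne : N.foldl (fun d i_nome => P.foldl (fun d i_pol => PySem.Set.add d |i_pol - i_nome|) d) ([] : PySem.Set Int) ≠ [] :=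
        fun h => by rw [h] at hmem; simp at hmem
      rcases hmm : PySem.List.min?
          (N.foldl (fun d i_nome => P.foldl (fun d i_pol => PySem.Set.add d |i_pol - i_nome|) d)
            ([] : PySem.Set Int)) (fun x => x) with _ | m
      · exact absurd ((PySem.List.min?_eq_none_iff _ _).1 hmm) hne
      · exact ⟨m, rfl⟩

-- ----- B side -----

def LastOf (L : List Int) (o : Option Int) : Prop :=
  (o = none ↔ L = []) ∧ (∀ j, o = some j → j ∈ L ∧ ∀ x ∈ L, x ≤ j)

def BestOf (N P : List Int) (o : Option Int) : Prop :=
  (o = none ↔ (N = [] ∨ P = [])) ∧ (∀ b, o = some b → GoodMin N P b)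

theorem goodmin_swap {N P : List Int} {m : Int} (h : GoodMin N P m) : GoodMin P N m := by
  obtain ⟨⟨n, hn, p, hp, hm⟩, hmin⟩ := h
  refine ⟨⟨p, hp, n, hn, by rw [hm, abs_sub_comm]⟩, fun p' hp' n' hn' => ?_⟩
  rw [abs_sub_comm]
  exact hmin n' hn' p' hp'

theorem bestof_swap {N P : List Int} {o : Option Int} (h : BestOf N P o) : BestOf P N o :=
  ⟨by rw [h.1]; tauto, fun b hb => goodmin_swap (h.2 b hb)⟩

theorem lastof_push {L : List Int} {s : Int} (hs : ∀ x ∈ L, x < s) :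
    LastOf (L ++ [s]) (some s) := by
  refine ⟨by simp, fun j hj => ?_⟩
  cases hj
  refine ⟨by simp, fun x hx => ?_⟩
  rcases List.mem_append.1 hx with h | h
  · exact le_of_lt (hs x h)
  · simp at h; omega

-- extending the name list with s, distance taken against the LAST polizia index, stays best
theorem bestof_extend {N P : List Int} {best lP : Option Int} {s : Int}
    (hP : LastOf P lP) (hB : BestOf N P best) (hPs : ∀ x ∈ P, x < s) :
    BestOf (N ++ [s]) P (pvUpd best lP s) := by
  cases lP with
  | none =>
    show BestOf (N ++ [s]) P best
    have hPe : P = [] := (hP.1).1 rfl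
    refine ⟨by simp [hPe, hB.1], ?_⟩
    intro b hb
    obtain ⟨⟨n, hn, p, hp, _⟩, _⟩ := hB.2 b hb
    rw [hPe] at hp
    simp at hp
  | some j =>
    show BestOf (N ++ [s]) P (pvSomeMin best (s - j))
    obtain ⟨hjP, hjmax⟩ := hP.2 j rfl
    have hjs : j < s := hPs j hjP
    have habsj : |j - s| = s - j := by
      rw [abs_sub_comm]; exact abs_of_nonneg (by omega)
    refine ⟨by simp [pvSomeMin, List.ne_nil_of_mem hjP], ?_⟩
    intro b hb
    simp only [pvSomeMin, Option.some.injEq] at hb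
    constructor
    · -- the value is some realised pair distance
      cases hbest : best with
      | none =>
        rw [hbest] at hb; simp at hb
        exact ⟨s, by simp, j, hjP, by omega⟩
      | some b0 =>
        rw [hbest] at hb; simp at hb
        obtain ⟨⟨n, hn, p, hp, hb0⟩, _⟩ := hB.2 b0 hbest
        rcases le_or_gt b0 (s - j) with h | h
        · exact ⟨n, by simp [hn], p, hp, by omega⟩
        · exact ⟨s, by simp, j, hjP, by omega⟩
    · -- lower bound on every pair distance
      intro n hn p hp
      have hps : p < s := hPs p hp
      rcases List.mem_append.1 hn with h | h
      · -- an old name index: the old bound still applies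
        cases hbest : best with
        | none =>
          rcases (hB.1).1 hbest with hNe | hPe
          · rw [hNe] at h; simp at h
          · rw [hPe] at hp; simp at hp
        | some b0 =>
          have hold := (hB.2 b0 hbest).2 n h p hp
          rw [hbest] at hb; simp at hb
          omega
      · -- the new index s: the last polizia index j is the closest one
        simp at h
        rw [h]
        have hpj := hjmax p hp
        have habsp : |p - s| = s - p := by
          rw [abs_sub_comm]; exact abs_of_nonneg (by omega)
        cases hbest : best <;> rw [hbest] at hb <;> simp at hb <;> omega

-- a line that is both a name and a polizia line: the minimum becomes 0
theorem bestof_both {N P : List Int} {best : Option Int} {s : Int} (hB : BestOf N P best) :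
    BestOf (N ++ [s]) (P ++ [s]) (pvUpd (pvUpd best (some s) s) (some s) s) := by
  refine ⟨by simp [pvUpd, pvSomeMin], ?_⟩
  intro b hb
  have hbz : b = 0 := by
    cases hbest : best with
    | none => rw [hbest] at hb; simp [pvUpd, pvSomeMin] at hb; omega
    | some b0 =>
      have h0 : 0 ≤ b0 := goodmin_nonneg (hB.2 b0 hbest)
      rw [hbest] at hb; simp [pvUpd, pvSomeMin] at hb; omega
  subst hbz
  exact ⟨⟨s, by simp, s, by simp, by simp⟩, fun n _ p _ => abs_nonneg _⟩

theorem B_inv (testo : List String) (s : Int) (st : Option Int × Option Int × Option Int)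
    (N P : List Int)
    (hN : LastOf N st.2.1) (hP : LastOf P st.2.2) (hB : BestOf N P st.1)
    (hNs : ∀ x ∈ N, x < s) (hPs : ∀ x ∈ P, x < s) :
    LastOf (N ++ NIdx testo s) ((PySem.List.enumerate testo s).foldl pvStep st).2.1 ∧
    LastOf (P ++ PIdx testo s) ((PySem.List.enumerate testo s).foldl pvStep st).2.2 ∧
    BestOf (N ++ NIdx testo s) (P ++ PIdx testo s)
      ((PySem.List.enumerate testo s).foldl pvStep st).1 := by
  induction testo generalizing s st N P with
  | nil =>
    simp only [PySem.List.enumerate_nil, List.foldl_nil, NIdx_nil, PIdx_nil, List.append_nil]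
    exact ⟨hN, hP, hB⟩
  | cons a t ih =>
    rw [PySem.List.enumerate_cons, List.foldl_cons, NIdx_cons, PIdx_cons,
        ← List.append_assoc, ← List.append_assoc]
    have hNs' : ∀ x ∈ N, x < s + 1 := fun x hx => by have := hNs x hx; omega
    have hPs' : ∀ x ∈ P, x < s + 1 := fun x hx => by have := hPs x hx; omega
    have hsing : ∀ x ∈ [s], x < s + 1 := by simp
    cases hn : pvNameLine a <;> cases hp : pvPolLine a <;>
      simp only [Bool.false_eq_true, if_false, if_true, List.append_nil]
    · -- neither
      have hstep : pvStep st (s, a) = (st.1, st.2.1, st.2.2) := by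
        simp [pvStep, hn, hp]
      rw [hstep]
      exact ih (s + 1) _ N P hN hP hB hNs' hPs'
    · -- polizia only
      have hstep : pvStep st (s, a) = (pvUpd st.1 st.2.1 s, st.2.1, some s) := by
        simp [pvStep, hn, hp]
      rw [hstep]
      exact ih (s + 1) _ N (P ++ [s]) hN (lastof_push hPs)
        (bestof_swap (bestof_extend hN (bestof_swap hB) hNs))
        hNs' (fun x hx => by rcases List.mem_append.1 hx with h | h
                             · exact hPs' x h
                             · exact hsing x h)
    · -- name only
      have hstep : pvStep st (s, a) = (pvUpd st.1 st.2.2 s, some s, st.2.2) := by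
        simp [pvStep, hn, hp]
      rw [hstep]
      exact ih (s + 1) _ (N ++ [s]) P (lastof_push hNs) hP
        (bestof_extend hP hB hPs)
        (fun x hx => by rcases List.mem_append.1 hx with h | h
                        · exact hNs' x h
                        · exact hsing x h)
        hPs'
    · -- both
      have hstep : pvStep st (s, a)
          = (pvUpd (pvUpd st.1 (some s) s) (some s) s, some s, some s) := by
        simp [pvStep, hn, hp]
      rw [hstep]
      exact ih (s + 1) _ (N ++ [s]) (P ++ [s]) (lastof_push hNs) (lastof_push hPs)
        (bestof_both hB)
        (fun x hx => by rcases List.mem_append.1 hx with h | h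
                        · exact hNs' x h
                        · exact hsing x h)
        (fun x hx => by rcases List.mem_append.1 hx with h | h
                        · exact hPs' x h
                        · exact hsing x h)

theorem B_char (testo : List String) :
    BestOf (NIdx testo 0) (PIdx testo 0) (distanza_polizia_alt testo) := by
  have h := B_inv testo 0 (none, none, none) [] []
    ⟨by simp, by simp⟩ ⟨by simp, by simp⟩ ⟨by simp, by simp⟩ (by simp) (by simp)
  simpa [distanza_polizia_alt] using h.2.2

-- ===== VERDICT (by name: the statement is the Claim_ definition above) =====
theorem distanza_polizia_spec : Claim_equal_distanza_polizia := by
  intro testo _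
  unfold Spec_distanza_polizia
  have hA := A_char testo
  have hB := B_char testo
  by_cases hE : NIdx testo 0 = [] ∨ PIdx testo 0 = []
  · rw [hA.1 hE, (hB.1).2 hE]
  · push Not at hE
    obtain ⟨mA, hmA⟩ := hA.2.2 hE.1 hE.2
    have hBne : distanza_polizia_alt testo ≠ none := by
      intro h; exact absurd ((hB.1).1 h) (by tauto)
    obtain ⟨mB, hmB⟩ := Option.ne_none_iff_exists'.1 hBne
    rw [hmA, hmB]
    exact congrArg some (goodmin_unique (hA.2.1 mA hmA) (hB.2 mB hmB))
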